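-- pv_equiv track=rewrite | github.com/vitalfocheux/Advent-Of-Code | 2020/20/20.py | get_matching_tiles
-- ===== SOURCE A (Python) =====
-- from collections import defaultdict
--
-- def get_edges(tile):
--     return [''.join(row) for row in [tile[0], tile[-1], [row[0] for row in tile], [row[-1] for row in tile]]]
--
-- def get_matching_tiles(tiles):
--     edges = defaultdict(list)
--     for id, tile in tiles.items():
--         for edge in get_edges(tile):
--             edges[edge].append(id)
--             edges[edge[::-1]].append(id)
--     matches = defaultdict(set)
--     for edge, ids in edges.items():
--         for id in ids:
--             matches[id].update(set(ids) - {id})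
--     return matches
-- ===== SOURCE B (Python) =====
-- from collections import defaultdict
--
-- def get_matching_tiles(tiles):
--     # Different decomposition: no inverted edge->ids index; per-tile 8-variant edge
--     # lists, then for each first-seen edge variant scan all tiles for sharers.
--     variants = {}
--     for id, tile in tiles.items():
--         top = ''.join(tile[0])
--         bottom = ''.join(tile[-1])
--         left = ''.join(row[0] for row in tile)
--         right = ''.join(row[-1] for row in tile)
--         vs = []
--         for e in (top, bottom, left, right):
--             vs.append(e)
--             vs.append(e[::-1])
--         variants[id] = vs
--     matches = defaultdict(set)
--     seen = set()
--     for id, vs in variants.items():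
--         for e in vs:
--             if e in seen:
--                 continue
--             seen.add(e)
--             sharers = [i for i, ws in variants.items() if e in ws]
--             for i in sharers:
--                 matches[i].update(s for s in sharers if s != i)
--     return matches
-- ===== Notes on version B (the rewrite author's own statement) =====
-- stated objective: alternative
-- what changed: B drops A's inverted edge->ids dictionary entirely: it precomputes each tile's 8 edge variants, then walks the variant stream with a seen-set and, for every first-seen variant, scans the tiles directly for sharers and links them pairwise.
import Mathlib
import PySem

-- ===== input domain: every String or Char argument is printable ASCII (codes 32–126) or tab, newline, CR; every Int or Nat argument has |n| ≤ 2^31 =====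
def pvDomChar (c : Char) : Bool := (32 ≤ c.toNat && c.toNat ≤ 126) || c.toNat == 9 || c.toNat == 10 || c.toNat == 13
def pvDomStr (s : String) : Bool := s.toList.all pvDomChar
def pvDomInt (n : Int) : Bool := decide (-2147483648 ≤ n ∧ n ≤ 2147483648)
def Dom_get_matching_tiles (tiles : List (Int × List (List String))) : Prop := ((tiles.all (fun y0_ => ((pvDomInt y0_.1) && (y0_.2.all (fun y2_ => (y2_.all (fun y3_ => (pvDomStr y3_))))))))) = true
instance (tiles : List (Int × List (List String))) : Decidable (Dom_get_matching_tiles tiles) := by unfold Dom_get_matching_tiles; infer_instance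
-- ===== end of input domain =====

-- B replaces A's inverted edge->ids dictionary by per-tile 8-variant edge lists with a
-- seen-set and a direct scan over the tiles for each first-seen edge variant (objective:
-- alternative; trades A's single-pass index for index-free rescanning).

-- ===== PORT A =====
-- edges are kept as List Char (''.join(row) and edge[::-1] on the char level)
def get_edges (tile : List (List String)) : List (List Char) :=
  [ PySem.List.pyGetD tile 0 [],
    PySem.List.pyGetD tile (-1) [],
    tile.map (fun row => PySem.List.pyGetD row 0 ""),
    tile.map (fun row => PySem.List.pyGetD row (-1) "") ].map
    (fun row => PySem.Chars.join [] (row.map String.toList))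

def get_matching_tiles (tiles : List (Int × List (List String))) : List (Int × List Int) :=
  let edges : PySem.Dict (List Char) (List Int) :=
    tiles.foldl (fun d p =>
      (get_edges p.2).foldl (fun d e =>
        (d.modify e [] (fun v => v ++ [p.1])).modify e.reverse [] (fun v => v ++ [p.1])) d)
      PySem.Dict.empty
  let mtchs : PySem.Dict Int (PySem.Set Int) :=
    edges.items.foldl (fun m pr =>
      pr.2.foldl (fun m i =>
        m.modify i PySem.Set.empty
          (fun s => PySem.Set.update s (PySem.Set.diff (PySem.Set.ofList pr.2) [i]))) m)
      PySem.Dict.empty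
  mtchs.items

-- ===== PORT B =====
def tileVariants (tile : List (List String)) : List (List Char) :=
  let top := PySem.Chars.join [] ((PySem.List.pyGetD tile 0 []).map String.toList)
  let bottom := PySem.Chars.join [] ((PySem.List.pyGetD tile (-1) []).map String.toList)
  let left := PySem.Chars.join [] ((tile.map (fun row => PySem.List.pyGetD row 0 "")).map String.toList)
  let right := PySem.Chars.join [] ((tile.map (fun row => PySem.List.pyGetD row (-1) "")).map String.toList)
  [top, bottom, left, right].foldl (fun vs e => (vs ++ [e]) ++ [e.reverse]) []

def get_matching_tiles_alt (tiles : List (Int × List (List String))) : List (Int × List Int) :=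
  let variants : PySem.Dict Int (List (List Char)) :=
    tiles.foldl (fun d p => d.insert p.1 (tileVariants p.2)) PySem.Dict.empty
  let res :=
    variants.items.foldl (fun ms pv =>
      pv.2.foldl (fun (ms : PySem.Dict Int (PySem.Set Int) × PySem.Set (List Char)) e =>
        if ms.2.contains e then ms
        else
          let sharers := ((variants.items.filter (fun q => q.2.contains e)).map (fun q => q.1))
          (sharers.foldl (fun m i =>
            m.modify i PySem.Set.empty
              (fun s => PySem.Set.update s (sharers.filter (fun j => j != i)))) ms.1,
           ms.2.add e)) ms)
      (PySem.Dict.empty, PySem.Set.empty)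
  res.1.items

-- ===== PRECONDITION & SPEC =====
-- Pre_ excludes association lists with duplicate tile ids (a Python dict cannot hold them;
-- their handling is an artefact of the list encoding of the dict argument) and inputs with
-- an empty tile or an empty row, on which A raises IndexError.
def Pre_get_matching_tiles (tiles : List (Int × List (List String))) : Prop :=
  (tiles.map (fun p => p.1)).Nodup ∧ ∀ p ∈ tiles, p.2 ≠ [] ∧ ∀ r ∈ p.2, r ≠ []
instance (tiles : List (Int × List (List String))) : Decidable (Pre_get_matching_tiles tiles) := by
  unfold Pre_get_matching_tiles; infer_instance

def pvWitness_get_matching_tiles : (List (Int × List (List String))) :=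
  [(1, [["a","b"],["c","d"]]), (2, [["a","b"],["x","y"]])]

def Spec_get_matching_tiles (tiles : List (Int × List (List String))) (out : List (Int × List Int)) : Prop := out = get_matching_tiles_alt tiles
instance (tiles : List (Int × List (List String))) (out : List (Int × List Int)) : Decidable (Spec_get_matching_tiles tiles out) := by unfold Spec_get_matching_tiles; infer_instance

-- ===== CLAIM (what is proved, stated in full; the proofs are below) =====
def Claim_equal_get_matching_tiles : Prop := ∀ (tiles : List (Int × List (List String))), Dom_get_matching_tiles tiles → Pre_get_matching_tiles tiles → Spec_get_matching_tiles tiles (get_matching_tiles tiles)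

-- ===== LEMMAS AND PROOFS =====

-- the stream of (edge-variant, id) append events A performs, flattened
def pvOccE (p : Int × List (List String)) : List (List Char × Int) :=
  (get_edges p.2).flatMap (fun e => [(e, p.1), (e.reverse, p.1)])

def pvOcc (tiles : List (Int × List (List String))) : List (List Char × Int) :=
  tiles.flatMap pvOccE

def pvIdsOf (tiles : List (Int × List (List String))) (e : List Char) : List Int :=
  ((pvOcc tiles).filter (fun q => q.1 == e)).map (fun q => q.2)

-- the unseen elements, in first-occurrence order, that a seen-set loop actually processes
def pvFresh {α : Type} [BEq α] (seen : PySem.Set α) : List α → List α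
  | [] => []
  | e :: t => if seen.contains e then pvFresh seen t else e :: pvFresh (seen.add e) t

lemma pvL_tileVariants_eq (t : List (List String)) :
    tileVariants t = (get_edges t).flatMap (fun e => [e, e.reverse]) := rfl

lemma pvL_update_eq_append_fresh {α : Type} [BEq α] [LawfulBEq α] :
    ∀ (es : List α) (seen : PySem.Set α),
      PySem.Set.update seen es = seen ++ pvFresh seen es := by
  intro es
  induction es with
  | nil => intro seen; simp [PySem.Set.update, pvFresh]
  | cons e t ih =>
    intro seen
    show PySem.Set.update (seen.add e) t = seen ++ pvFresh seen (e :: t)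
    by_cases h : seen.contains e
    · have h' : e ∈ seen := by simpa [PySem.Set.contains] using h
      have hadd : seen.add e = seen := by simp [PySem.Set.add, h']
      rw [hadd, ih]
      simp [pvFresh, h']
    · have h' : e ∉ seen := by simpa [PySem.Set.contains] using h
      have hadd : seen.add e = seen ++ [e] := by simp [PySem.Set.add, h']
      rw [ih, hadd]
      simp [pvFresh, h']

lemma pvL_fresh_nil_eq_dedup {α : Type} [BEq α] [LawfulBEq α] (es : List α) :
    pvFresh (PySem.Set.empty) es = PySem.List.dedup es := by
  have h := pvL_update_eq_append_fresh es PySem.Set.empty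
  simpa [PySem.List.dedup, PySem.Set.ofList, PySem.Set.update, PySem.Set.empty] using h.symm

lemma pvL_edgesA_eq (tiles : List (Int × List (List String))) :
    (tiles.foldl (fun d p =>
      (get_edges p.2).foldl (fun d e =>
        (d.modify e [] (fun v => v ++ [p.1])).modify e.reverse [] (fun v => v ++ [p.1])) d)
      PySem.Dict.empty)
    = (pvOcc tiles).foldl (fun d q => d.modify q.1 [] (fun v => v ++ [q.2])) PySem.Dict.empty := by
  rw [pvOcc, List.foldl_flatMap]
  congr 1

lemma pvL_itemsA (tiles : List (Int × List (List String))) :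
    ((pvOcc tiles).foldl (fun d q => d.modify q.1 [] (fun v => v ++ [q.2])) PySem.Dict.empty).items
    = (PySem.List.dedup ((pvOcc tiles).map (fun q => q.1))).map
        (fun e => (e, pvIdsOf tiles e)) := by
  have hkeys : ((pvOcc tiles).foldl (fun d q => d.modify q.1 [] (fun v => v ++ [q.2])) PySem.Dict.empty).keys
      = PySem.List.dedup ((pvOcc tiles).map (fun q => q.1)) := by
    rw [PySem.Dict.keys_foldl_modify_key (pvOcc tiles) (fun q => q.1) [] (fun _ q v => v ++ [q.2]) PySem.Dict.empty]
    rfl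
  have hnd : ((pvOcc tiles).foldl (fun d q => d.modify q.1 [] (fun v => v ++ [q.2])) PySem.Dict.empty).keys.Nodup := by
    apply PySem.Dict.nodup_keys_foldl_modify_key (pvOcc tiles) (fun q => q.1) [] (fun _ q v => v ++ [q.2]) PySem.Dict.empty
    simp [PySem.Dict.keys, PySem.Dict.empty]
  rw [PySem.Dict.items_eq_map_keys _ hnd [], hkeys]
  apply List.map_congr_left
  intro e he
  have h := PySem.Dict.getD_foldl_modify_append (pvOcc tiles) PySem.Dict.empty e
  simp only [PySem.Dict.getD, PySem.Dict.get?, PySem.Dict.empty] at h ⊢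
  simp at h
  rw [h]
  rfl

lemma pvL_loopB_eq {α σ : Type} [BEq α] (act : α → σ → σ) :
    ∀ (es : List α) (m : σ) (seen : PySem.Set α),
      (es.foldl (fun ms e => if ms.2.contains e then ms else (act e ms.1, ms.2.add e)) (m, seen))
      = ((pvFresh seen es).foldl (fun m e => act e m) m, PySem.Set.update seen es) := by
  intro es
  induction es with
  | nil => intro m seen; simp [pvFresh, PySem.Set.update]
  | cons e t ih =>
    intro m seen
    by_cases h : seen.contains e
    · have hadd : seen.add e = seen := by
        simp only [PySem.Set.add, h, if_true]
      simp only [List.foldl_cons, h, if_true]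
      rw [ih]
      have hu : PySem.Set.update seen (e :: t) = PySem.Set.update (seen.add e) t := rfl
      rw [hu, hadd]
      have hf : pvFresh seen (e :: t) = pvFresh seen t := by
        simp only [pvFresh, h, if_true]
      rw [hf]
    · simp only [List.foldl_cons, h]
      rw [ih]
      have hu : PySem.Set.update seen (e :: t) = PySem.Set.update (seen.add e) t := rfl
      rw [hu]
      have h2 : List.contains seen e = false := by simpa using h
      have hf : pvFresh seen (e :: t) = e :: pvFresh (seen.add e) t := by
        simp [pvFresh, PySem.Set.contains, h2]
      rw [hf]
      simp

lemma pvL_variants_items (tiles : List (Int × List (List String)))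
    (hnd : (tiles.map (fun p => p.1)).Nodup) :
    (tiles.foldl (fun d p => d.insert p.1 (tileVariants p.2)) PySem.Dict.empty).items
    = tiles.map (fun p => (p.1, tileVariants p.2)) := by
  have h := PySem.Dict.items_foldl_insert_fresh tiles (fun p => p.1) (fun p => tileVariants p.2)
    PySem.Dict.empty (by intro a _; rfl) hnd
  simpa [PySem.Dict.empty] using h

lemma pvL_flatten_eq (tiles : List (Int × List (List String))) :
    (tiles.map (fun p => (p.1, tileVariants p.2))).flatMap (fun pv => pv.2)
    = (pvOcc tiles).map (fun q => q.1) := by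
  simp [pvOcc, pvOccE, List.map_flatMap, List.flatMap_map, pvL_tileVariants_eq]

lemma pvL_update_map_const {α γ : Type} [BEq α] [LawfulBEq α] (a : α) :
    ∀ (xs : List γ) (s : PySem.Set α),
      PySem.Set.update s (xs.map (fun _ => a)) = if xs.isEmpty then s else s.add a := by
  intro xs
  induction xs with
  | nil => intro s; simp [PySem.Set.update]
  | cons x t ih =>
    intro s
    show PySem.Set.update (s.add a) (t.map (fun _ => a)) = _
    rw [ih]
    by_cases h : t.isEmpty
    · simp [h]
    · simp only [h, List.isEmpty_cons]
      have hadd : (s.add a).add a = s.add a := by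
        by_cases hm : a ∈ s <;> simp [PySem.Set.add, PySem.Set.contains, hm]
      rw [hadd]
      simp

lemma pvL_update_flatMap_const {α β γ : Type} [BEq α] [LawfulBEq α]
    (f : β → List γ) (key : β → α) :
    ∀ (l : List β) (s : PySem.Set α), (l.map key).Nodup → (∀ p ∈ l, key p ∉ s) →
      PySem.Set.update s (l.flatMap (fun p => (f p).map (fun _ => key p)))
      = s ++ (l.filter (fun p => !(f p).isEmpty)).map key := by
  intro l
  induction l with
  | nil => intro s _ _; simp [PySem.Set.update]
  | cons p t ih =>
    intro s hnd hdisj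
    have hsplit : PySem.Set.update s ((p :: t).flatMap (fun p => (f p).map (fun _ => key p)))
        = PySem.Set.update (PySem.Set.update s ((f p).map (fun _ => key p)))
            (t.flatMap (fun p => (f p).map (fun _ => key p))) := by
      simp [PySem.Set.update, List.flatMap_cons, List.foldl_append]
    rw [hsplit, pvL_update_map_const]
    have hnd' : (t.map key).Nodup := (List.nodup_cons.mp hnd).2
    by_cases hemp : (f p).isEmpty
    · rw [if_pos hemp]
      rw [ih s hnd' (fun q hq => hdisj q (by simp [hq]))]
      simp [hemp]
    · rw [if_neg hemp]
      have hps : key p ∉ s := hdisj p (by simp)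
      have hadd : s.add (key p) = s ++ [key p] := by
        simp [PySem.Set.add, PySem.Set.contains, hps]
      rw [hadd]
      rw [ih (s ++ [key p]) hnd' ?_]
      · simp [hemp]
      · intro q hq
        simp only [List.mem_append, List.mem_singleton]
        rintro (hqs | hqp)
        · exact hdisj q (by simp [hq]) hqs
        · have : key p ∉ t.map key := (List.nodup_cons.mp hnd).1
          exact this (hqp ▸ List.mem_map_of_mem hq)

-- the sharers B scans for are exactly the dedup of the ids list A groups
lemma pvL_sharers_eq (tiles : List (Int × List (List String)))
    (hnd : (tiles.map (fun p => p.1)).Nodup) (e : List Char) :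
    ((tiles.map (fun p => (p.1, tileVariants p.2))).filter (fun q => q.2.contains e)).map (fun q => q.1)
    = PySem.List.dedup (pvIdsOf tiles e) := by
  have hids : pvIdsOf tiles e
      = tiles.flatMap (fun p => ((tileVariants p.2).filter (fun v => v == e)).map (fun _ => p.1)) := by
    rw [pvIdsOf, pvOcc]
    rw [List.filter_flatMap, List.map_flatMap]
    apply List.flatMap_congr ?_
    intro p _
    rw [pvOccE]
    have hpair : (get_edges p.2).flatMap (fun e' => [(e', p.1), (e'.reverse, p.1)])
        = ((get_edges p.2).flatMap (fun e' => [e', e'.reverse])).map (fun v => (v, p.1)) := by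
      simp [List.map_flatMap]
    rw [hpair, ← pvL_tileVariants_eq, List.filter_map, List.map_map]
    rfl
  rw [hids]
  have hded := pvL_update_flatMap_const (fun p => (tileVariants p.2).filter (fun v => v == e))
    (fun p : Int × List (List String) => p.1) tiles PySem.Set.empty hnd (by intro p _; simp [PySem.Set.empty])
  have hdedup : PySem.List.dedup (tiles.flatMap (fun p => ((tileVariants p.2).filter (fun v => v == e)).map (fun _ => p.1)))
      = (tiles.filter (fun p => !((tileVariants p.2).filter (fun v => v == e)).isEmpty)).map (fun p => p.1) := by
    simpa [PySem.List.dedup, PySem.Set.ofList, PySem.Set.update, PySem.Set.empty] using hded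
  rw [hdedup]
  rw [List.filter_map]
  rw [List.map_map]
  apply congrArg (List.map _)
  apply List.filter_congr
  intro p _
  show (tileVariants p.2).contains e = !((tileVariants p.2).filter (fun v => v == e)).isEmpty
  by_cases hm : e ∈ tileVariants p.2
  · have : ((tileVariants p.2).filter (fun v => v == e)) ≠ [] := by
      intro hnil
      have := List.filter_eq_nil_iff.mp hnil e hm
      simp at this
    simp [hm, this]
  · have hnil : (tileVariants p.2).filter (fun v => v == e) = [] :=
      List.filter_eq_nil_iff.mpr (fun a ha => by
        simp only [beq_iff_eq]
        rintro rfl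
        exact hm ha)
    simp [hm, hnil]

lemma pvL_mem_update {α : Type} [BEq α] [LawfulBEq α] :
    ∀ (l : List α) (s : PySem.Set α) (x : α), x ∈ PySem.Set.update s l ↔ x ∈ s ∨ x ∈ l := by
  intro l
  induction l with
  | nil => intro s x; simp [PySem.Set.update]
  | cons e t ih =>
    intro s x
    show x ∈ PySem.Set.update (s.add e) t ↔ _
    rw [ih]
    by_cases h : e ∈ s
    · simp [PySem.Set.add, PySem.Set.contains, h]
      constructor
      · rintro (hx | hx) <;> simp [hx]
      · rintro (hx | hx | hx) <;> simp [hx]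
        subst hx; left; exact h
    · simp [PySem.Set.add, PySem.Set.contains, h, List.mem_append]
      constructor
      · rintro ((hx | hx) | hx) <;> simp [hx]
      · rintro (hx | hx | hx) <;> simp [hx]

lemma pvL_update_eq_self {α : Type} [BEq α] [LawfulBEq α] :
    ∀ (l : List α) (s : PySem.Set α), (∀ x ∈ l, x ∈ s) → PySem.Set.update s l = s := by
  intro l
  induction l with
  | nil => intro s _; rfl
  | cons e t ih =>
    intro s h
    have he : e ∈ s := h e (by simp)
    have hadd : s.add e = s := by simp [PySem.Set.add, PySem.Set.contains, he]
    show PySem.Set.update (s.add e) t = s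
    rw [hadd]
    exact ih s (fun x hx => h x (by simp [hx]))

lemma pvL_update_idem {α : Type} [BEq α] [LawfulBEq α] (s : PySem.Set α) (l : List α) :
    PySem.Set.update (PySem.Set.update s l) l = PySem.Set.update s l := by
  apply pvL_update_eq_self
  intro x hx
  rw [pvL_mem_update]
  right; exact hx

lemma pvL_replace_eq_self {κ ν : Type} [BEq κ] [LawfulBEq κ] (k : κ) (v : ν) :
    ∀ (L : List (κ × ν)), (L.map (fun q => q.1)).Nodup →
      ∀ pr, List.find? (fun p => p.1 == k) L = some pr → pr.2 = v →
      L.map (fun q => if q.1 == k then (k, v) else q) = L := by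
  intro L
  induction L with
  | nil => intro _ pr hpr; simp at hpr
  | cons q t ih =>
    intro hnd pr hfind hv
    by_cases hq : q.1 == k
    · have hfq : pr = q := by
        rw [List.find?_cons] at hfind
        rw [hq] at hfind
        exact (Option.some_inj.mp hfind).symm
      have hk : q.1 = k := by simpa using hq
      have hkv : (k, v) = q := by
        rw [← hk, ← hv, hfq]
      have htail : ∀ p ∈ t, ¬ ((p.1 == k) = true) := by
        intro p hp hpk
        have hq1 : q.1 ∉ t.map (fun r => r.1) := (List.nodup_cons.mp hnd).1
        have hqp : q.1 = p.1 := by rw [hk]; exact (by simpa using hpk : p.1 = k).symm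
        exact hq1 (hqp ▸ List.mem_map_of_mem hp)
      have hmap : List.map (fun r => if r.1 == k then (k, v) else r) t = List.map id t :=
        List.map_congr_left (fun p hp => by simp [htail p hp])
      simp only [List.map_cons, hq, if_true, hmap, List.map_id]
      rw [hkv]
    · rw [List.find?_cons] at hfind
      rw [Bool.eq_false_iff.mpr hq] at hfind
      simp only [List.map_cons]
      rw [if_neg hq]
      have hnd' : (t.map (fun q => q.1)).Nodup := (List.nodup_cons.mp hnd).2
      rw [ih hnd' pr hfind hv]

lemma pvL_insert_eq_self {κ ν : Type} [BEq κ] [LawfulBEq κ]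
    (d : PySem.Dict κ ν) (k : κ) (v : ν) (hnd : d.keys.Nodup) (h : d.get? k = some v) :
    d.insert k v = d := by
  rcases Option.map_eq_some_iff.mp (show (List.find? (fun p => p.1 == k) d.items).map (fun x => x.2) = some v from h) with ⟨pr, hfind, hv⟩
  have hc : d.contains k = true := by
    simp only [PySem.Dict.contains]
    have hpk : (pr.1 == k) = true := List.find?_some (p := fun p : κ × ν => p.1 == k) hfind
    exact List.any_eq_true.mpr ⟨pr, List.mem_of_find?_eq_some hfind, hpk⟩
  apply PySem.Dict.ext
  simp only [PySem.Dict.insert, hc, if_true]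
  exact pvL_replace_eq_self k v d.items hnd pr hfind hv

lemma pvL_fold_modify_dedup (g : Int → PySem.Set Int → PySem.Set Int)
    (hg : ∀ i s, g i (g i s) = g i s) :
    ∀ (ids : List Int) (seen : PySem.Set Int) (m : PySem.Dict Int (PySem.Set Int)),
      m.keys.Nodup → (∀ i ∈ seen, ∃ v, m.get? i = some v ∧ g i v = v) →
      ids.foldl (fun m i => m.modify i PySem.Set.empty (g i)) m
      = (pvFresh seen ids).foldl (fun m i => m.modify i PySem.Set.empty (g i)) m := by
  intro ids
  induction ids with
  | nil => intro seen m _ _; rfl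
  | cons i t ih =>
    intro seen m hnd hinv
    by_cases hc : seen.contains i
    · have hmem : i ∈ seen := by simpa [PySem.Set.contains] using hc
      obtain ⟨v, hget, hgv⟩ := hinv i hmem
      have hstep : m.modify i PySem.Set.empty (g i) = m := by
        have : m.getD i PySem.Set.empty = v := by simp [PySem.Dict.getD, hget]
        simp only [PySem.Dict.modify, this, hgv]
        exact pvL_insert_eq_self m i v hnd hget
      have hf : pvFresh seen (i :: t) = pvFresh seen t := by
        simp [pvFresh, PySem.Set.contains, hmem]
      simp only [List.foldl_cons, hstep, hf]
      exact ih seen m hnd hinv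
    · have hmem' : i ∉ seen := by simpa [PySem.Set.contains] using hc
      have hf : pvFresh seen (i :: t) = i :: pvFresh (seen.add i) t := by
        simp [pvFresh, PySem.Set.contains, hmem']
      simp only [List.foldl_cons, hf]
      apply ih (seen.add i) (m.modify i PySem.Set.empty (g i))
        (PySem.Dict.nodup_keys_insert m i _ hnd)
      intro j hj
      have hji : j ∈ seen ∨ j = i := by
        have hadd : seen.add i = seen ++ [i] := by
          simp [PySem.Set.add, PySem.Set.contains, hmem']
        rw [hadd] at hj
        simpa using hj
      rcases hji with hjs | hji
      · have hne : j ≠ i := by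
          rintro rfl
          exact hmem' hjs
        obtain ⟨v, hget, hgv⟩ := hinv j hjs
        exact ⟨v, by rw [PySem.Dict.modify, PySem.Dict.get?_insert_of_ne m _ hne]; exact hget, hgv⟩
      · subst hji
        refine ⟨g j (m.getD j PySem.Set.empty), ?_, hg _ _⟩
        rw [PySem.Dict.modify, PySem.Dict.get?_insert_self]

lemma pvL_diff_eq_filter (ids : List Int) (i : Int) :
    PySem.Set.diff (PySem.Set.ofList ids) [i]
    = (PySem.List.dedup ids).filter (fun j => j != i) := by
  show ((PySem.Set.ofList ids).filter (fun x => !(PySem.Set.contains [i] x))) = _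
  apply List.filter_congr
  intro j _
  by_cases hji : j = i <;> simp [PySem.Set.contains, hji]

lemma pvL_nodup_block (f : Int → PySem.Set Int → PySem.Set Int) :
    ∀ (ids : List Int) (m : PySem.Dict Int (PySem.Set Int)), m.keys.Nodup →
      (ids.foldl (fun m i => m.modify i PySem.Set.empty (f i)) m).keys.Nodup := by
  intro ids
  induction ids with
  | nil => intro m h; exact h
  | cons i t ih =>
    intro m h
    exact ih _ (PySem.Dict.nodup_keys_insert m i _ h)

lemma pvL_block_eq (ids : List Int) (sh : List Int) (hsh : sh = PySem.List.dedup ids)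
    (m : PySem.Dict Int (PySem.Set Int)) (hnd : m.keys.Nodup) :
    ids.foldl (fun m i =>
      m.modify i PySem.Set.empty
        (fun s => PySem.Set.update s (PySem.Set.diff (PySem.Set.ofList ids) [i]))) m
    = sh.foldl (fun m i =>
      m.modify i PySem.Set.empty
        (fun s => PySem.Set.update s (sh.filter (fun j => j != i)))) m := by
  have hD : ∀ i : Int, PySem.Set.diff (PySem.Set.ofList ids) [i] = sh.filter (fun j => j != i) := by
    intro i; rw [hsh]; exact pvL_diff_eq_filter ids i
  have hgoal1 : ids.foldl (fun m i =>
      m.modify i PySem.Set.empty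
        (fun s => PySem.Set.update s (PySem.Set.diff (PySem.Set.ofList ids) [i]))) m
      = ids.foldl (fun m i =>
      m.modify i PySem.Set.empty
        (fun s => PySem.Set.update s (sh.filter (fun j => j != i)))) m := by
    apply PySem.List.foldl_congr_mem
    intro m' i _
    rw [hD i]
  rw [hgoal1]
  have h := pvL_fold_modify_dedup
    (fun i s => PySem.Set.update s (sh.filter (fun j => j != i)))
    (fun i s => pvL_update_idem s _) ids PySem.Set.empty m hnd (by intro i hi; simp [PySem.Set.empty] at hi)
  rw [h, pvL_fresh_nil_eq_dedup, ← hsh]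

def pvSharers (tiles : List (Int × List (List String))) (e : List Char) : List Int :=
  ((tiles.map (fun p => (p.1, tileVariants p.2))).filter (fun q => q.2.contains e)).map (fun q => q.1)

def pvActB (tiles : List (Int × List (List String))) (e : List Char)
    (m : PySem.Dict Int (PySem.Set Int)) : PySem.Dict Int (PySem.Set Int) :=
  (pvSharers tiles e).foldl (fun m i =>
    m.modify i PySem.Set.empty
      (fun s => PySem.Set.update s ((pvSharers tiles e).filter (fun j => j != i)))) m

theorem get_matching_tiles_spec : Claim_equal_get_matching_tiles := by
  unfold Claim_equal_get_matching_tiles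
  intro tiles _ hpre
  unfold Spec_get_matching_tiles
  have hnd : (tiles.map (fun p => p.1)).Nodup := hpre.1
  show get_matching_tiles tiles = get_matching_tiles_alt tiles
  rw [get_matching_tiles, get_matching_tiles_alt]
  -- A side: rewrite the edges dict and its items
  rw [pvL_edgesA_eq, pvL_itemsA, List.foldl_map]
  -- B side
  rw [pvL_variants_items tiles hnd]
  rw [show ∀ (L : List (Int × List (List Char))) (init : PySem.Dict Int (PySem.Set Int) × PySem.Set (List Char))
        (body : PySem.Dict Int (PySem.Set Int) × PySem.Set (List Char) → List Char → PySem.Dict Int (PySem.Set Int) × PySem.Set (List Char)),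
        L.foldl (fun ms pv => pv.2.foldl body ms) init = (L.flatMap (fun pv => pv.2)).foldl body init from
      fun L init body => (List.foldl_flatMap).symm]
  rw [pvL_flatten_eq]
  show _ = ((((pvOcc tiles).map (fun q => q.1)).foldl
      (fun ms e => if ms.2.contains e then ms else (pvActB tiles e ms.1, ms.2.add e))
      (PySem.Dict.empty, PySem.Set.empty)).1).items
  rw [pvL_loopB_eq (pvActB tiles), pvL_fresh_nil_eq_dedup]
  -- both sides are now folds over the same key list; equate block by block
  have main : ∀ (ks : List (List Char)) (m : PySem.Dict Int (PySem.Set Int)), m.keys.Nodup →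
      ks.foldl (fun m e => (pvIdsOf tiles e).foldl (fun m i =>
        m.modify i PySem.Set.empty
          (fun s => PySem.Set.update s (PySem.Set.diff (PySem.Set.ofList (pvIdsOf tiles e)) [i]))) m) m
      = ks.foldl (fun m e => pvActB tiles e m) m := by
    intro ks
    induction ks with
    | nil => intro m _; rfl
    | cons e ks ih =>
      intro m hm
      simp only [List.foldl_cons]
      rw [show (pvIdsOf tiles e).foldl (fun m i =>
          m.modify i PySem.Set.empty
            (fun s => PySem.Set.update s (PySem.Set.diff (PySem.Set.ofList (pvIdsOf tiles e)) [i]))) m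
          = pvActB tiles e m from
        pvL_block_eq (pvIdsOf tiles e) (pvSharers tiles e)
          (pvL_sharers_eq tiles hnd e) m hm]
      exact ih _ (by
        show (((pvSharers tiles e)).foldl (fun m i =>
          m.modify i PySem.Set.empty
            (fun s => PySem.Set.update s ((pvSharers tiles e).filter (fun j => j != i)))) m).keys.Nodup
        exact pvL_nodup_block _ _ m hm)
  exact congrArg PySem.Dict.items
    (main (PySem.List.dedup ((pvOcc tiles).map (fun q => q.1))) PySem.Dict.empty
      (by simp [PySem.Dict.keys, PySem.Dict.empty]))
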